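-- pv_equiv track=rewrite | github.com/rogautier/packmem | dico.py | detect_duplicate
-- ===== SOURCE A (Python) =====
-- def detect_duplicate(dico):
--     flagD=0
--     dicotmp={}
--     for key in dico:
--         for val in dico[key]:
--             if val in dicotmp:
--                 flagD=1
--             else:
--                 dicotmp[val]=1
--     return flagD
-- ===== SOURCE B (Python) =====
-- def detect_duplicate(dico):
--     vals = sorted(v for vs in dico.values() for v in vs)
--     return 1 if any(x == y for x, y in zip(vals, vals[1:])) else 0
-- ===== Notes on version B (the rewrite author's own statement) =====
-- stated objective: alternative
-- what changed: Replaces A's hash-membership marking loop with sort-then-scan: flatten all value lists, sort them, and report a duplicate iff some adjacent pair is equal.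
import Mathlib
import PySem

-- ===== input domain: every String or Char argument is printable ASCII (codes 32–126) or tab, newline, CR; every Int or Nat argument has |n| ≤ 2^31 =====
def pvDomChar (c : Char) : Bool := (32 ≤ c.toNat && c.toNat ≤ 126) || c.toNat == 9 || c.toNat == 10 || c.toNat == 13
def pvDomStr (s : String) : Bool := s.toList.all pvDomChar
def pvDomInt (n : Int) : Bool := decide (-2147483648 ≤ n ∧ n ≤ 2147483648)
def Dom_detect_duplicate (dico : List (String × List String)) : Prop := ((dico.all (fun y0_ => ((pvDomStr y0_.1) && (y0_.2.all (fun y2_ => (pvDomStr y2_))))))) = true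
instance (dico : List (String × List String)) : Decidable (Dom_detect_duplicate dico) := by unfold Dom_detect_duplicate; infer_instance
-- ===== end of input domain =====

-- B sorts the flattened values and reports a duplicate iff some adjacent pair is equal
-- (sort-then-scan instead of A's per-element seen-dict marking); same result, different algorithm.


-- ===== PORT A =====
-- inner loop body: 'if val in dicotmp: flagD=1 else: dicotmp[val]=1'
def detectStepA (st : Int × PySem.Dict String Int) (val : String) : Int × PySem.Dict String Int :=
  if st.2.contains val then (1, st.2) else (st.1, st.2.insert val 1)

def detect_duplicate (dico : List (String × List String)) : Int :=
  (dico.foldl (fun st kv => kv.2.foldl detectStepA st) ((0 : Int), PySem.Dict.empty)).1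

-- ===== PORT B =====
def detect_duplicate_alt (dico : List (String × List String)) : Int :=
  let vals := PySem.List.sorted (dico.flatMap (fun kv => kv.2)) (fun x => x) false
  if (vals.zip vals.tail).any (fun p => p.1 == p.2) then 1 else 0

-- ===== PRECONDITION & SPEC =====
def Spec_detect_duplicate (dico : List (String × List String)) (out : Int) : Prop := out = detect_duplicate_alt dico
instance (dico : List (String × List String)) (out : Int) : Decidable (Spec_detect_duplicate dico out) := by unfold Spec_detect_duplicate; infer_instance

-- ===== CLAIM (what is proved, stated in full; the proofs are below) =====
def Claim_equal_detect_duplicate : Prop := ∀ (dico : List (String × List String)), Dom_detect_duplicate dico → Spec_detect_duplicate dico (detect_duplicate dico)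

-- ===== LEMMAS AND PROOFS =====

-- A's nested loop over the dict's value lists is the loop over the flattened values
theorem foldl_detectStepA_flatten (dico : List (String × List String))
    (st : Int × PySem.Dict String Int) :
    dico.foldl (fun st kv => kv.2.foldl detectStepA st) st
      = (dico.flatMap (fun kv => kv.2)).foldl detectStepA st := by
  induction dico generalizing st with
  | nil => rfl
  | cons kv t ih => simp [List.flatMap_cons, List.foldl_append, ih]

-- loop invariant: the flag stays as it was iff the remaining values are fresh and pairwise new
theorem foldl_detectStepA_flag (l : List String) (flag : Int) (d : PySem.Dict String Int) :
    (l.foldl detectStepA (flag, d)).1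
      = if l.Nodup ∧ ∀ x ∈ l, d.contains x = false then flag else 1 := by
  induction l generalizing flag d with
  | nil => simp
  | cons v t ih =>
    by_cases h : d.contains v = true
    · simp only [List.foldl_cons, detectStepA, h, if_true, ih]
      have : ¬ ((v :: t).Nodup ∧ ∀ x ∈ v :: t, d.contains x = false) := by
        rintro ⟨-, hall⟩
        exact absurd (hall v (List.mem_cons_self)) (by simp [h])
      rw [if_neg this, ite_self]
    · simp only [List.foldl_cons, detectStepA, h, Bool.false_eq_true, if_false, ih]
      have hiff : (t.Nodup ∧ ∀ x ∈ t, (d.insert v 1).contains x = false)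
          ↔ ((v :: t).Nodup ∧ ∀ x ∈ v :: t, d.contains x = false) := by
        simp only [List.nodup_cons, List.mem_cons, PySem.Dict.contains_insert]
        constructor
        · rintro ⟨hnd, hall⟩
          refine ⟨⟨fun hv => ?_, hnd⟩, ?_⟩
          · have := hall v hv; simp at this
          · rintro x (rfl | hx)
            · simpa using h
            · have := hall x hx; simp at this; exact this.2
        · rintro ⟨⟨hv, hnd⟩, hall⟩
          refine ⟨hnd, fun x hx => ?_⟩
          have hne : x ≠ v := fun he => hv (he ▸ hx)
          simp [hne, hall x (Or.inr hx)]
      rw [if_congr hiff rfl rfl]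

-- a weakly increasing list has an equal adjacent pair iff it is not Nodup
theorem adjDup_iff_not_nodup (l : List String) (hs : l.Pairwise (· ≤ ·)) :
    ((l.zip l.tail).any (fun p => p.1 == p.2) = true) ↔ ¬ l.Nodup := by
  induction l with
  | nil => simp
  | cons a t ih =>
    cases t with
    | nil => simp
    | cons b u =>
      rcases List.pairwise_cons.mp hs with ⟨hab, hs'⟩
      by_cases he : a = b
      · subst he
        simp [List.any_cons]
      · have hlt : ∀ x ∈ b :: u, a < x := by
          have hab' : a < b := lt_of_le_of_ne (hab b List.mem_cons_self) he
          intro x hx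
          rcases List.mem_cons.mp hx with rfl | hx
          · exact hab'
          · exact lt_of_lt_of_le hab' ((List.pairwise_cons.mp hs').1 x hx)
        have hnotin : a ∉ b :: u := fun hm => lt_irrefl a (hlt a hm)
        have hz : (((a :: b :: u).zip (a :: b :: u).tail).any (fun p => p.1 == p.2))
            = ((a == b) || (((b :: u).zip (b :: u).tail).any (fun p => p.1 == p.2))) := by
          simp [List.zip]
        rw [hz, Bool.or_eq_true]
        have : ((a == b) = true) ↔ False := by simp [he]
        rw [this, false_or, ih hs']
        exact not_congr ((List.nodup_cons.trans (and_iff_right hnotin)).symm)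

-- sorting preserves Nodup (it is a permutation)
theorem nodup_sorted_iff (l : List String) :
    (PySem.List.sorted l (fun x => x) false).Nodup ↔ l.Nodup :=
  (PySem.List.sorted_perm (xs := l) (key := fun x => x) (rev := false)).nodup_iff

-- ===== VERDICT (by name: the statement is the Claim_ definition above) =====
theorem detect_duplicate_spec : Claim_equal_detect_duplicate := by
  intro dico _
  unfold Spec_detect_duplicate detect_duplicate detect_duplicate_alt
  dsimp only
  rw [foldl_detectStepA_flatten, foldl_detectStepA_flag]
  set l := dico.flatMap (fun kv => kv.2) with hl
  set s := PySem.List.sorted l (fun x => x) false with hs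
  have hsp : s.Pairwise (· ≤ ·) := by
    simpa using PySem.List.sorted_pairwise (xs := l) (key := fun x => x)
  have hadj := adjDup_iff_not_nodup s hsp
  rw [nodup_sorted_iff] at hadj
  by_cases hnd : l.Nodup
  · have : ¬ ((s.zip s.tail).any (fun p => p.1 == p.2) = true) := by
      rw [hadj]; exact not_not_intro hnd
    simp [hnd, PySem.Dict.contains_empty, this]
  · simp [hnd, hadj.mpr hnd]
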